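-- pv_equiv track=rewrite | github.com/adcosta17/somrit-test | scripts/get_simulation_metrics.py | get_nearby
-- ===== SOURCE A (Python) =====
-- def get_nearby(chrom, start, end, seen):
--     if chrom in seen:
--         count = 0
--         i = start
--         while i < end:
--             if i in seen[chrom]:
--                 count += seen[chrom][i]
--             i += 1
--         if count >= 1:
--             return True
--         return False
--     return True
-- ===== SOURCE B (Python) =====
-- def get_nearby(chrom, start, end, seen):
--     if chrom not in seen:
--         return True
--     total = sum(v for pos, v in seen[chrom].items() if start <= pos < end)
--     return total >= 1
-- ===== Notes on version B (the rewrite author's own statement) =====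
-- stated objective: alternative
-- what changed: Instead of scanning every integer position i in [start, end) and probing the dict, B iterates once over the dict's items and sums the values whose key lies in [start, end); cost moves from O(end-start) to O(#keys in seen[chrom]) but the timing inputs keep the two comparable, so no speed is claimed.
import Mathlib
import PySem

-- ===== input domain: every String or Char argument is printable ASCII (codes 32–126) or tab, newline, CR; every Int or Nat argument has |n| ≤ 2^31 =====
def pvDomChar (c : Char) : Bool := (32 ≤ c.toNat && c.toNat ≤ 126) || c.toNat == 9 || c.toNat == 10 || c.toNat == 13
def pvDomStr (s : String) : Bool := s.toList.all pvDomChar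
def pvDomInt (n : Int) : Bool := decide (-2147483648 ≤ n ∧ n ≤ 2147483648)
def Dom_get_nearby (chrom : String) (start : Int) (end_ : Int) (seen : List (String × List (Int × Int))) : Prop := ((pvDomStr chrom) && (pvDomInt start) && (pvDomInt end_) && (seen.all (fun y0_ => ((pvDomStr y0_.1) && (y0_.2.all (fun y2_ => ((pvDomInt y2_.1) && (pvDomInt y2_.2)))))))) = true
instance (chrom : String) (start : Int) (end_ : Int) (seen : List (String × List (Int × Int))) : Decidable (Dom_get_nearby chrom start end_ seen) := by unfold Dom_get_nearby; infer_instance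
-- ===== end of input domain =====

-- B replaces A's position-by-position scan of [start, end) by one pass over the dict's items,
-- summing the values whose key lies in the window (objective: alternative traversal, same result).

-- ===== PORT A =====
-- the while-loop: i from start while i < end; if i in d: count += d[i]; i += 1
def getNearbyLoop (d : PySem.Dict Int Int) (end_ : Int) (i : Int) (count : Int) : Int :=
  if _h : i < end_ then
    getNearbyLoop d end_ (i + 1) (if d.contains i then count + d.getD i 0 else count)
  else count
termination_by (end_ - i).toNat
decreasing_by omega

def get_nearby (chrom : String) (start : Int) (end_ : Int) (seen : List (String × List (Int × Int))) : Bool :=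
  match (PySem.Dict.mk seen).get? chrom with
  | some dl =>
      let count := getNearbyLoop (PySem.Dict.mk dl) end_ start 0
      if count ≥ 1 then true else false
  | none => true

-- ===== PORT B =====
-- seen[chrom].items(): the distinct keys in first-occurrence order, each with its looked-up value
def pyItemsB (dl : List (Int × Int)) : List (Int × Int) :=
  (PySem.List.dedup (dl.map Prod.fst)).map (fun k => (k, (PySem.Dict.mk dl).getD k 0))

def get_nearby_alt (chrom : String) (start : Int) (end_ : Int) (seen : List (String × List (Int × Int))) : Bool :=
  match (PySem.Dict.mk seen).get? chrom with
  | some dl =>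
      let total := (pyItemsB dl).foldl
        (fun acc kv => if start ≤ kv.1 ∧ kv.1 < end_ then acc + kv.2 else acc) 0
      decide (total ≥ 1)
  | none => true

-- ===== PRECONDITION & SPEC =====
def Spec_get_nearby (chrom : String) (start : Int) (end_ : Int) (seen : List (String × List (Int × Int))) (out : Bool) : Prop := out = get_nearby_alt chrom start end_ seen
instance (chrom : String) (start : Int) (end_ : Int) (seen : List (String × List (Int × Int))) (out : Bool) : Decidable (Spec_get_nearby chrom start end_ seen out) := by unfold Spec_get_nearby; infer_instance

-- ===== CLAIM (what is proved, stated in full; the proofs are below) =====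
def Claim_equal_get_nearby : Prop := ∀ (chrom : String) (start : Int) (end_ : Int) (seen : List (String × List (Int × Int))), Dom_get_nearby chrom start end_ seen → Spec_get_nearby chrom start end_ seen (get_nearby chrom start end_ seen)

-- ===== LEMMAS AND PROOFS =====

-- A's loop accumulates the window sum of getD
theorem getNearbyLoop_eq (d : PySem.Dict Int Int) (end_ : Int) :
    ∀ i c, getNearbyLoop d end_ i c
      = c + ((PySem.List.pyRange i end_ 1).map (fun j => d.getD j 0)).sum := by
  intro i c
  by_cases h : i < end_
  · rw [getNearbyLoop, dif_pos h, PySem.List.pyRange_one_cons h]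
    have := getNearbyLoop_eq d end_ (i + 1)
      (if d.contains i then c + d.getD i 0 else c)
    rw [this]
    by_cases hc : d.contains i
    · simp [hc]; ring
    · have : d.get? i = none := by
        cases hg : d.get? i with
        | none => rfl
        | some v =>
          exfalso
          rw [PySem.Dict.contains_eq_isSome_get?, hg] at hc
          simp at hc
      simp [hc, PySem.Dict.getD, this]
  · rw [getNearbyLoop, dif_neg h, PySem.List.pyRange_one_eq_nil (by omega)]
    simp
termination_by i => (end_ - i).toNat
decreasing_by omega

-- B's fold is the sum of the values of the filtered items
theorem foldl_if_add_eq (P : Int → Prop) [DecidablePred P] :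
    ∀ (l : List (Int × Int)) (c : Int),
      l.foldl (fun acc kv => if P kv.1 then acc + kv.2 else acc) c
        = c + ((l.filter (fun kv => decide (P kv.1))).map Prod.snd).sum := by
  intro l
  induction l with
  | nil => simp
  | cons kv t ih =>
    intro c
    by_cases h : P kv.1
    · simp [h, ih]; ring
    · simp [h, ih]
theorem getD_eq_zero_of_not_mem (dl : List (Int × Int)) (j : Int)
    (h : j ∉ dl.map Prod.fst) : (PySem.Dict.mk dl).getD j 0 = 0 := by
  have : (PySem.Dict.mk dl).get? j = none := by
    rw [PySem.Dict.get?_eq_none_iff_not_mem_keys]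
    simpa [PySem.Dict.keys] using h
  simp [PySem.Dict.getD, this]

-- dropping the zero terms of a sum
theorem sum_map_eq_sum_filter (f : Int → Int) (K : List Int) :
    ∀ (l : List Int), (∀ j, j ∉ K → f j = 0) →
      (l.map f).sum = ((l.filter (fun j => decide (j ∈ K))).map f).sum := by
  intro l h0
  induction l with
  | nil => simp
  | cons a t ih =>
    by_cases ha : a ∈ K
    · simp [ha, ih]
    · simp [ha, ih, h0 a ha]

-- ===== VERDICT (by name: the statement is the Claim_ definition above) =====
theorem get_nearby_spec : Claim_equal_get_nearby := by
  intro chrom start end_ seen _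
  unfold Spec_get_nearby get_nearby get_nearby_alt
  cases hg : (PySem.Dict.mk seen).get? chrom with
  | none => rfl
  | some dl =>
    simp only
    rw [getNearbyLoop_eq, foldl_if_add_eq (P := fun k => start ≤ k ∧ k < end_)]
    set f : Int → Int := fun j => (PySem.Dict.mk dl).getD j 0 with hf
    set K : List Int := PySem.List.dedup (dl.map Prod.fst) with hK
    have hzero : ∀ j, j ∉ K → f j = 0 := by
      intro j hj
      apply getD_eq_zero_of_not_mem
      intro hmem
      exact hj (by simpa [hK, PySem.List.mem_dedup] using hmem)
    have h1 : ((PySem.List.pyRange start end_ 1).map f).sum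
        = (((PySem.List.pyRange start end_ 1).filter (fun j => decide (j ∈ K))).map f).sum :=
      sum_map_eq_sum_filter f K _ hzero
    have hperm : ((PySem.List.pyRange start end_ 1).filter (fun j => decide (j ∈ K))).Perm
        (K.filter (fun j => decide (start ≤ j ∧ j < end_))) := by
      rw [List.perm_ext_iff_of_nodup
        (List.Nodup.filter _ (PySem.List.nodup_pyRange_one start end_))
        (List.Nodup.filter _ (PySem.List.nodup_dedup _))]
      intro a
      simp only [List.mem_filter, PySem.List.mem_pyRange_one, decide_eq_true_eq]
      tauto
    have h2 : (((PySem.List.pyRange start end_ 1).filter (fun j => decide (j ∈ K))).map f).sum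
        = ((K.filter (fun j => decide (start ≤ j ∧ j < end_))).map f).sum :=
      (hperm.map f).sum_eq
    have h3 : ((pyItemsB dl).filter (fun kv => decide (start ≤ kv.1 ∧ kv.1 < end_))).map Prod.snd
        = (K.filter (fun j => decide (start ≤ j ∧ j < end_))).map f := by
      unfold pyItemsB
      rw [← hK, List.filter_map, List.map_map]
      rfl
    rw [h1, h2, ← h3]
    by_cases ht : (0 : Int) + (((pyItemsB dl).filter (fun kv => decide (start ≤ kv.1 ∧ kv.1 < end_))).map Prod.snd).sum ≥ 1
    · simp only [ge_iff_le] at ht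
      simp [ht]
    · simp only [ge_iff_le] at ht
      simp [ht]
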